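-- pv_equiv track=rewrite | github.com/diogo-cruz/QCHACK2022 | qkd/src/app_bob.py | get_inv_shuffled_key
-- ===== SOURCE A (Python) =====
-- def get_shuffled_key(key, shuffle):
--     # the i-th position of the suffled key is the shuffle[i]-th position of the key
--     shuffled_key = [key[s] for s in shuffle]
--     return shuffled_key
--
-- def get_inv_shuffled_key(inv_key, shuffle):
--     inversion = [[i, shuffle[i]] for i in range(len(shuffle))]
--     def take_second(elem):
--         return elem[1]
--     inversion.sort(key = take_second)
--     new_shuffle = [x[0] for x in inversion]
--     key = get_shuffled_key(inv_key, new_shuffle)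
--     return key
-- ===== SOURCE B (Python) =====
-- def get_inv_shuffled_key(inv_key, shuffle):
--     # Group the key elements by their shuffle value in one dict-building pass,
--     # then walk the distinct shuffle values in increasing order and emit each
--     # group: no decorated tuple list is built and only the (usually far fewer)
--     # distinct values are sorted; ties keep original order because each group
--     # list is filled left to right.
--     groups = {}
--     for s, v in zip(shuffle, inv_key):
--         groups.setdefault(s, []).append(v)
--     out = []
--     for s in sorted(groups):
--         out.extend(groups[s])
--     return out
-- ===== Notes on version B (the rewrite author's own statement) =====
-- stated objective: alternative
-- what changed: A decorates every position with (i, shuffle[i]), sorts the whole decorated list with a key function and re-indexes inv_key; B never sorts the elements: it buckets key elements by shuffle value into a dict in one pass, sorts only the distinct shuffle values and concatenates the buckets (a group-by / bucket approach, stable because buckets are filled left to right).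
import Mathlib
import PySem

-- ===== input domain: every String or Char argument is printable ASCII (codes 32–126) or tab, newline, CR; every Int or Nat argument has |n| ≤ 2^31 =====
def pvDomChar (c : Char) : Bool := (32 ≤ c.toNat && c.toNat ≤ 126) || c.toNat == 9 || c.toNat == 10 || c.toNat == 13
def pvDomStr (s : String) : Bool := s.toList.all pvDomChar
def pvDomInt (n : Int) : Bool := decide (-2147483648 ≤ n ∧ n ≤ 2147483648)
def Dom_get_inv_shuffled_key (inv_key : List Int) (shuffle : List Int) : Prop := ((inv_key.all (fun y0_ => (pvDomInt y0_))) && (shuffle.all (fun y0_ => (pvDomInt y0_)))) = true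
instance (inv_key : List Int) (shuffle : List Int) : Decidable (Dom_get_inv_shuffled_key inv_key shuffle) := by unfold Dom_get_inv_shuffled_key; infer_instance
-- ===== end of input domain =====

-- B replaces A's decorate-sort-project by a group-by: it buckets key elements by shuffle
-- value in one dict pass, sorts only the distinct shuffle values and concatenates the
-- buckets; objective: alternative algorithm of similar cost.


-- ===== PORT A =====
-- helper: shuffled_key = [key[s] for s in shuffle]
-- (pyGetD is exact here: under Pre_ every index this port feeds it is in range 0..n-1)
def get_shuffled_key (key : List Int) (shuffle : List Int) : List Int :=
  shuffle.map (fun s => PySem.List.pyGetD key s 0)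

-- A's local sort key take_second
def pvTakeSecond (elem : Int × Int) : Int := elem.2

def get_inv_shuffled_key (inv_key : List Int) (shuffle : List Int) : List Int :=
  let inversion : List (Int × Int) :=
    (PySem.List.pyRange 0 (shuffle.length : Int) 1).map
      (fun i => (i, PySem.List.pyGetD shuffle i 0))
  let sortedInv := PySem.List.sorted inversion pvTakeSecond
  let new_shuffle := sortedInv.map (fun x => x.1)
  get_shuffled_key inv_key new_shuffle

-- ===== PORT B =====
-- groups = {}; for s, v in zip(shuffle, inv_key): groups.setdefault(s, []).append(v)
-- out = []; for s in sorted(groups): out.extend(groups[s]); return out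
def get_inv_shuffled_key_alt (inv_key : List Int) (shuffle : List Int) : List Int :=
  let groups : PySem.Dict Int (List Int) :=
    (shuffle.zip inv_key).foldl (fun d p => d.modify p.1 [] (fun g => g ++ [p.2])) PySem.Dict.empty
  (PySem.List.sorted groups.keys (fun x => x)).foldl (fun out s => out ++ groups.getD s []) []

-- ===== PRECONDITION & SPEC =====
-- Pre_ is exactly A's domain: A indexes inv_key at every position 0..len(shuffle)-1 and
-- raises IndexError iff inv_key is shorter than shuffle; nothing else is excluded.
def Pre_get_inv_shuffled_key (inv_key : List Int) (shuffle : List Int) : Prop :=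
  shuffle.length ≤ inv_key.length
instance (inv_key : List Int) (shuffle : List Int) : Decidable (Pre_get_inv_shuffled_key inv_key shuffle) := by unfold Pre_get_inv_shuffled_key; infer_instance

def pvWitness_get_inv_shuffled_key : List Int × List Int := ([3, 1, 2], [2, 0, 1])

def Spec_get_inv_shuffled_key (inv_key : List Int) (shuffle : List Int) (out : List Int) : Prop := out = get_inv_shuffled_key_alt inv_key shuffle
instance (inv_key : List Int) (shuffle : List Int) (out : List Int) : Decidable (Spec_get_inv_shuffled_key inv_key shuffle out) := by unfold Spec_get_inv_shuffled_key; infer_instance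

-- ===== CLAIM (what is proved, stated in full; the proofs are below) =====
def Claim_equal_get_inv_shuffled_key : Prop := ∀ (inv_key : List Int) (shuffle : List Int), Dom_get_inv_shuffled_key inv_key shuffle → Pre_get_inv_shuffled_key inv_key shuffle → Spec_get_inv_shuffled_key inv_key shuffle (get_inv_shuffled_key inv_key shuffle)

-- ===== LEMMAS AND PROOFS =====

-- ---- Part 1: A's value is map snd of the stable sort of (shuffle value, key element) pairs ----

-- inserting a mapped element into a mapped list commutes with the map when the
-- comparison only reads the image
lemma pv_insertBy_map {α β : Type} (g : α → β) (key : β → Int) (x : α) (ys : List α) :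
    PySem.List.insertBy (fun a b => decide (key a < key b)) (g x) (ys.map g)
      = (PySem.List.insertBy (fun a b => decide (key (g a) < key (g b))) x ys).map g := by
  induction ys with
  | nil => rfl
  | cons y ys ih =>
    simp only [List.map_cons, PySem.List.insertBy]
    by_cases h : key (g x) < key (g y)
    · simp [h]
    · simp [h, ih]

-- stable sort commutes with a key-respecting map
lemma pv_sorted_map {α β : Type} (xs : List α) (g : α → β) (key : β → Int) :
    PySem.List.sorted (xs.map g) key
      = (PySem.List.sorted xs (fun a => key (g a))).map g := by
  rw [PySem.List.sorted_eq_foldl_insertBy, PySem.List.sorted_eq_foldl_insertBy, List.foldl_map]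
  suffices h : ∀ acc : List α,
      xs.foldl (fun acc x => PySem.List.insertBy (fun a b => decide (key a < key b)) (g x) acc) (acc.map g)
        = (xs.foldl (fun acc x => PySem.List.insertBy (fun a b => decide (key (g a) < key (g b))) x acc) acc).map g by
    simpa using h []
  induction xs with
  | nil => intro acc; rfl
  | cons x xs ih =>
    intro acc
    simp only [List.foldl_cons]
    rw [pv_insertBy_map g key x acc]
    exact ih _

-- the pair (index, value) decorated by A, re-decorated to (value, key element)
def pvG (inv_key : List Int) (p : Int × Int) : Int × Int :=
  (p.2, PySem.List.pyGetD inv_key p.1 0)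

-- A's inversion list as a map over List.range
lemma pv_inversion_eq (shuffle : List Int) :
    (PySem.List.pyRange 0 (shuffle.length : Int) 1).map
        (fun i => (i, PySem.List.pyGetD shuffle i 0))
      = (List.range shuffle.length).map (fun k : Nat => ((k : Int), shuffle.getD k 0)) := by
  rw [PySem.List.pyRange_one]
  simp [List.map_map, Function.comp_def]

-- zip(shuffle, inv_key) is A's inversion list pushed through pvG
lemma pv_zip_eq (inv_key : List Int) (shuffle : List Int)
    (hlen : shuffle.length ≤ inv_key.length) :
    shuffle.zip inv_key
      = ((List.range shuffle.length).map (fun k : Nat => ((k : Int), shuffle.getD k 0))).map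
          (pvG inv_key) := by
  apply List.ext_getElem
  · simp [List.length_zip, Nat.min_eq_left hlen]
  · intro j h1 h2
    simp only [List.length_zip, Nat.min_eq_left hlen] at h1
    rw [List.getElem_zip]
    rw [List.getElem_map, List.getElem_map, List.getElem_range]
    unfold pvG
    simp only [PySem.List.pyGetD_natCast]
    rw [List.getD_eq_getElem _ _ h1, List.getD_eq_getElem _ _ (Nat.lt_of_lt_of_le h1 hlen)]

lemma pv_A_eq (inv_key : List Int) (shuffle : List Int)
    (hlen : shuffle.length ≤ inv_key.length) :
    get_inv_shuffled_key inv_key shuffle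
      = (PySem.List.sorted (shuffle.zip inv_key) (fun p => p.1)).map (fun p => p.2) := by
  unfold get_inv_shuffled_key get_shuffled_key
  rw [pv_inversion_eq shuffle, pv_zip_eq inv_key shuffle hlen,
      pv_sorted_map _ (pvG inv_key) (fun p => p.1)]
  rw [List.map_map, List.map_map]
  rfl

-- ---- Part 2: the stable sort is the concatenation of the per-value groups taken in
-- ---- increasing order of the distinct values ----

-- insertBy puts x in front when x goes before every element
lemma pv_insertBy_front {α : Type} (f : α → α → Bool) (x : α) (l : List α)
    (h : ∀ y ∈ l, f x y = true) :
    PySem.List.insertBy f x l = x :: l := by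
  cases l with
  | nil => rfl
  | cons y ys => simp [PySem.List.insertBy, h y (by simp)]

-- insertBy skips a prefix it goes after
lemma pv_insertBy_skip {α : Type} (f : α → α → Bool) (x : α) (g l : List α)
    (h : ∀ y ∈ g, f x y = false) :
    PySem.List.insertBy f x (g ++ l) = g ++ PySem.List.insertBy f x l := by
  induction g with
  | nil => rfl
  | cons y ys ih =>
    simp only [List.cons_append, PySem.List.insertBy, h y (by simp)]
    simp only [Bool.false_eq_true, if_false, List.cons.injEq, true_and]
    exact ih (fun y hy => h y (by simp [hy]))

lemma pv_flatMap_congr {α β : Type} (l : List α) (f g : α → List β)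
    (h : ∀ x ∈ l, f x = g x) : l.flatMap f = l.flatMap g := by
  induction l with
  | nil => rfl
  | cons x xs ih =>
    simp only [List.flatMap_cons, h x (by simp)]
    rw [ih (fun y hy => h y (by simp [hy]))]

-- inserting one pair into a group-ordered concatenation = appending it to its group
-- (inserting the new value among the distinct values if it is fresh)
lemma pv_ins (z : Int × Int) (g : Int → List (Int × Int)) :
    ∀ ks : List Int, ks.Pairwise (· < ·) →
      (∀ k ∈ ks, g k ≠ [] ∧ ∀ p ∈ g k, p.1 = k) →
      (z.1 ∉ ks → g z.1 = []) →
      PySem.List.insertBy (fun a b => decide (a.1 < b.1)) z (ks.flatMap g)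
        = (if z.1 ∈ ks then ks
           else PySem.List.insertBy (fun a b => decide (a < b)) z.1 ks).flatMap
            (fun k => g k ++ if z.1 == k then [z] else []) := by
  intro ks
  induction ks with
  | nil =>
    intro _ _ hfresh
    simp [PySem.List.insertBy, hfresh (by simp)]
  | cons k t ih =>
    intro hpw hg hfresh
    have hpw' := (List.pairwise_cons.mp hpw).2
    have hkt : ∀ k' ∈ t, k < k' := (List.pairwise_cons.mp hpw).1
    have hgk := hg k (by simp)
    have hmemk : ∀ p ∈ g k, p.1 = k := hgk.2
    rcases lt_trichotomy z.1 k with hlt | heq | hgt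
    · -- z.1 < k : z goes in front of everything
      have hnot : z.1 ∉ k :: t := by
        intro hm
        rcases List.mem_cons.mp hm with h | h
        · omega
        · exact absurd (hkt _ h) (by omega)
      have hgz : g z.1 = [] := hfresh hnot
      rw [if_neg hnot]
      have hfront : ∀ y ∈ (k :: t).flatMap g, decide (z.1 < y.1) = true := by
        intro y hy
        rcases List.mem_flatMap.mp hy with ⟨k', hk', hyk'⟩
        have := (hg k' hk').2 y hyk'
        rcases List.mem_cons.mp hk' with h | h
        · subst h; simp [this]; omega
        · have := hkt k' h; simp [(hg _ hk').2 y hyk']; omega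
      rw [pv_insertBy_front _ _ _ hfront]
      have : PySem.List.insertBy (fun a b => decide (a < b)) z.1 (k :: t) = z.1 :: k :: t := by
        apply pv_insertBy_front
        intro y hy
        rcases List.mem_cons.mp hy with h | h
        · subst h; simp [hlt]
        · have := hkt y h; simp; omega
      rw [this]
      have hz_ne : ∀ k' ∈ k :: t, (z.1 == k') = false := by
        intro k' hk'
        rcases List.mem_cons.mp hk' with h | h
        · subst h; simp; omega
        · have := hkt k' h; simp; omega
      have hcongr : List.flatMap (fun k => g k ++ if (z.1 == k) = true then [z] else []) t
          = List.flatMap g t :=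
        pv_flatMap_congr t (fun k => g k ++ if (z.1 == k) = true then [z] else []) g
          (fun x hx => by simp [hz_ne x (by simp [hx])])
      have hzk : (if (z.1 == k) = true then [z] else ([] : List (Int × Int))) = [] := by
        rw [hz_ne k (by simp)]; rfl
      have hzz : (if (z.1 == z.1) = true then [z] else ([] : List (Int × Int))) = [z] := by simp
      simp only [List.flatMap_cons, hcongr, hgz, hzk, hzz, List.nil_append, List.append_nil]
      rfl
    · -- z.1 = k : z appended to k's group
      rw [if_pos (by simp [heq])]
      simp only [List.flatMap_cons]
      rw [pv_insertBy_skip _ _ (g k) _ (by intro y hy; have := hmemk y hy; simp [this, heq])]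
      have hrest : ∀ y ∈ t.flatMap g, decide (z.1 < y.1) = true := by
        intro y hy
        rcases List.mem_flatMap.mp hy with ⟨k', hk', hyk'⟩
        have h1 := (hg k' (by simp [hk'])).2 y hyk'
        have := hkt k' hk'
        simp [h1]; omega
      rw [pv_insertBy_front _ _ _ hrest]
      have hz_ne : ∀ k' ∈ t, (z.1 == k') = false := by
        intro k' hk'; have := hkt k' hk'; simp; omega
      have hcongr : List.flatMap (fun k => g k ++ if (z.1 == k) = true then [z] else []) t
          = List.flatMap g t :=
        pv_flatMap_congr t (fun k => g k ++ if (z.1 == k) = true then [z] else []) g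
          (fun x hx => by simp [hz_ne x hx])
      have hzk : (if (z.1 == k) = true then [z] else ([] : List (Int × Int))) = [z] := by
        simp [heq]
      simp only [hcongr, hzk]
      simp
    · -- z.1 > k : skip k's group and recurse
      have hz_ne_k : (z.1 == k) = false := by simp; omega
      have hmem_iff : z.1 ∈ k :: t ↔ z.1 ∈ t := by
        constructor
        · intro h; rcases List.mem_cons.mp h with h | h
          · omega
          · exact h
        · intro h; exact List.mem_cons_of_mem _ h
      rw [List.flatMap_cons]
      rw [pv_insertBy_skip _ _ (g k) _ (by intro y hy; have := hmemk y hy; simp [this]; omega)]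
      rw [ih hpw' (fun k' hk' => hg k' (by simp [hk'])) (fun hn => hfresh (by rw [hmem_iff]; exact hn))]
      by_cases hm : z.1 ∈ t
      · rw [if_pos (hmem_iff.mpr hm), if_pos hm]
        simp
        omega
      · rw [if_neg (fun h => hm (hmem_iff.mp h)), if_neg hm]
        have : PySem.List.insertBy (fun a b => decide (a < b)) z.1 (k :: t)
            = k :: PySem.List.insertBy (fun a b => decide (a < b)) z.1 t := by
          simp [PySem.List.insertBy]; omega
        rw [this]
        simp
        omega

-- the main characterisation: stable sort by first component = sorted distinct firsts,
-- each expanded to its group of pairs in original order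
lemma pv_main (zs : List (Int × Int)) :
    PySem.List.sorted zs (fun p => p.1)
      = (PySem.List.sorted (PySem.Set.ofList (zs.map (fun p => p.1))) (fun x => x)).flatMap
          (fun s => zs.filter (fun p => p.1 == s)) := by
  induction zs using List.reverseRecOn with
  | nil => rfl
  | append_singleton zs z ih =>
    have hsortapp : PySem.List.sorted (zs ++ [z]) (fun p : Int × Int => p.1)
        = PySem.List.insertBy (fun a b => decide (a.1 < b.1)) z
            (PySem.List.sorted zs (fun p => p.1)) := by
      rw [PySem.List.sorted_eq_foldl_insertBy, PySem.List.sorted_eq_foldl_insertBy,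
        List.foldl_append]
      rfl
    rw [hsortapp, ih]
    set ks := PySem.List.sorted (PySem.Set.ofList (zs.map (fun p => p.1))) (fun x => x) with hks
    have hpw : ks.Pairwise (· < ·) := PySem.List.sorted_ofList_pairwise_lt _
    have hmemks : ∀ k, k ∈ ks ↔ k ∈ zs.map (fun p => p.1) := by
      intro k
      rw [hks, PySem.List.mem_sorted, PySem.Set.mem_ofList]
    have hgrp : ∀ k ∈ ks, zs.filter (fun p => p.1 == k) ≠ [] ∧
        ∀ p ∈ zs.filter (fun p => p.1 == k), p.1 = k := by
      intro k hk
      constructor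
      · rcases List.mem_map.mp ((hmemks k).mp hk) with ⟨p, hp, hpk⟩
        intro hnil
        have : p ∈ zs.filter (fun p => p.1 == k) := by
          rw [List.mem_filter]; exact ⟨hp, by simp [hpk]⟩
        rw [hnil] at this; simp at this
      · intro p hp
        have := (List.mem_filter.mp hp).2
        simpa using this
    have hfresh : z.1 ∉ ks → zs.filter (fun p => p.1 == z.1) = [] := by
      intro hn
      rw [List.filter_eq_nil_iff]
      intro p hp hc
      apply hn
      rw [hmemks]
      exact List.mem_map.mpr ⟨p, hp, by simpa using hc⟩
    rw [pv_ins z _ ks hpw hgrp hfresh]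
    have hfilter : ∀ s, (zs ++ [z]).filter (fun p => p.1 == s)
        = zs.filter (fun p => p.1 == s) ++ (if z.1 == s then [z] else []) := by
      intro s
      rw [List.filter_append]
      congr 1
      cases h : (z.1 == s) <;> simp [h]
    have hkeys : (if z.1 ∈ ks then ks
           else PySem.List.insertBy (fun a b => decide (a < b)) z.1 ks)
        = PySem.List.sorted (PySem.Set.ofList ((zs ++ [z]).map (fun p => p.1))) (fun x => x) := by
      have hof : PySem.Set.ofList ((zs ++ [z]).map (fun p => p.1))
          = PySem.Set.add (PySem.Set.ofList (zs.map (fun p => p.1))) z.1 := by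
        rw [List.map_append, PySem.Set.ofList_eq_foldl, PySem.Set.ofList_eq_foldl,
          List.foldl_append]
        rfl
      by_cases hm : z.1 ∈ ks
      · rw [if_pos hm, hof]
        have : PySem.Set.add (PySem.Set.ofList (zs.map (fun p => p.1))) z.1
            = PySem.Set.ofList (zs.map (fun p => p.1)) := by
          have hz : z.1 ∈ PySem.Set.ofList (zs.map (fun p => p.1)) := by
            rw [PySem.Set.mem_ofList]; exact (hmemks _).mp hm
          exact PySem.Set.add_of_mem hz
        rw [this]
      · rw [if_neg hm, hof]
        have hz : z.1 ∉ PySem.Set.ofList (zs.map (fun p => p.1)) := by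
          rw [PySem.Set.mem_ofList]; exact fun h => hm ((hmemks _).mpr h)
        have : PySem.Set.add (PySem.Set.ofList (zs.map (fun p => p.1))) z.1
            = PySem.Set.ofList (zs.map (fun p => p.1)) ++ [z.1] :=
          PySem.Set.add_of_not_mem hz
        rw [this, PySem.List.sorted_eq_foldl_insertBy, List.foldl_append,
          ← PySem.List.sorted_eq_foldl_insertBy]
        rfl
    rw [← hkeys]
    apply pv_flatMap_congr
    intro s _
    rw [hfilter s]

-- ---- Part 3: B computes exactly that concatenation ----

lemma pv_B_eq (inv_key : List Int) (shuffle : List Int) :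
    get_inv_shuffled_key_alt inv_key shuffle
      = (PySem.List.sorted (PySem.Set.ofList ((shuffle.zip inv_key).map (fun p => p.1)))
            (fun x => x)).flatMap
          (fun s => ((shuffle.zip inv_key).filter (fun p => p.1 == s)).map (fun p => p.2)) := by
  unfold get_inv_shuffled_key_alt
  set zs := shuffle.zip inv_key with hzs
  have hkeys : (zs.foldl (fun d p => d.modify p.1 [] (fun g => g ++ [p.2]))
        PySem.Dict.empty).keys = PySem.Set.ofList (zs.map (fun p => p.1)) := by
    rw [PySem.Dict.keys_foldl_modify_key]
    simp [PySem.Set.update, PySem.Set.ofList_eq_foldl, PySem.Dict.keys_empty]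
  have hgetD : ∀ s, (zs.foldl (fun d p => d.modify p.1 [] (fun g => g ++ [p.2]))
        PySem.Dict.empty).getD s []
      = (zs.filter (fun p => p.1 == s)).map (fun p => p.2) := by
    intro s
    rw [PySem.Dict.getD_foldl_modify_append]
    simp [PySem.Dict.getD_empty]
  simp only [hkeys]
  rw [PySem.List.foldl_append_eq_flatMap]
  rw [List.nil_append]
  apply pv_flatMap_congr
  intro s _
  exact hgetD s

-- ===== VERDICT (by name: the statement is the Claim_ definition above) =====
theorem get_inv_shuffled_key_spec : Claim_equal_get_inv_shuffled_key := by
  intro inv_key shuffle _ hpre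
  unfold Spec_get_inv_shuffled_key
  rw [pv_A_eq inv_key shuffle hpre, pv_B_eq inv_key shuffle, pv_main]
  rw [List.map_flatMap]
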